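-- pv_equiv track=rewrite | github.com/ChrisMinions/The-Examination-of-Netease-2017-Autumn-Recruitment | 网易2017秋招编程题：回文序列.py | calc
-- ===== SOURCE A (Python) =====
-- def calc(dig_list):
--     length = len(dig_list)
--     if length == 1 or length == 0:
--         return 0
--     else:
--         if dig_list[0] == dig_list[-1]:
--             return calc(dig_list[1:-1])
--         elif dig_list[0] > dig_list[-1]:
--             temp = dig_list[-1] + dig_list[-2]
--             temp_list = dig_list[:-2]
--             temp_list.append(temp)
--             return 1 + calc(temp_list)
--         else:
--             temp = dig_list[0] + dig_list[1]
--             temp_list = dig_list[1:]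
--             temp_list[0] = temp
--             return 1 + calc(temp_list)
-- ===== SOURCE B (Python) =====
-- def calc(dig_list):
--     n = len(dig_list)
--     if n == 0:
--         return 0
--     i, j = 0, n - 1
--     left, right = dig_list[0], dig_list[j]
--     count = 0
--     while i < j:
--         if left == right:
--             i += 1
--             j -= 1
--             if i < j:
--                 left = dig_list[i]
--                 right = dig_list[j]
--         elif left > right:
--             j -= 1
--             right += dig_list[j]
--             count += 1
--         else:
--             i += 1
--             left += dig_list[i]
--             count += 1
--     return count
-- ===== Notes on version B (the rewrite author's own statement) =====
-- stated objective: faster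
-- what changed: Replaced A's recursion that rebuilds the list with slices/appends at every step by an iterative two-pointer loop over the original list with running merged end-values and a counter.
import Mathlib
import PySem

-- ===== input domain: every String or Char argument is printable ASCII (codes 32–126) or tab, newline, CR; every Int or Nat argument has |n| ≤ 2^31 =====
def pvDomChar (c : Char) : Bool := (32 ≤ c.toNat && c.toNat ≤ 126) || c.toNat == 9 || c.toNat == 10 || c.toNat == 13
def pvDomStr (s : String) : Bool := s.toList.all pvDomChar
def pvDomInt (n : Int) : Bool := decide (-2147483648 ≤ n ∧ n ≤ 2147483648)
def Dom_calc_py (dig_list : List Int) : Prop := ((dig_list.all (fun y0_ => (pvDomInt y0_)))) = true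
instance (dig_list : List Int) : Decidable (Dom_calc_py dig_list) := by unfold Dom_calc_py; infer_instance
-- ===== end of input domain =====

-- B replaces A's recursive slice-and-rebuild scan by an iterative two-pointer loop with running merge sums (measured faster).


-- ===== PORT A =====
-- literal transliteration of A: recursion on the list with Python slices/element writes;
-- the indices 0, -1, -2, 1 are in range whenever read (length ≥ 2 there), so the total
-- pyGetD/pySetD forms are exact.
def calc_py (dig_list : List Int) : Int :=
  if dig_list.length = 1 ∨ dig_list.length = 0 then 0
  else
    if PySem.List.pyGetD dig_list 0 0 = PySem.List.pyGetD dig_list (-1) 0 then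
      calc_py (PySem.List.slice dig_list (some 1) (some (-1)))
    else if PySem.List.pyGetD dig_list 0 0 > PySem.List.pyGetD dig_list (-1) 0 then
      let temp := PySem.List.pyGetD dig_list (-1) 0 + PySem.List.pyGetD dig_list (-2) 0
      let temp_list := PySem.List.slice dig_list none (some (-2)) ++ [temp]
      1 + calc_py temp_list
    else
      let temp := PySem.List.pyGetD dig_list 0 0 + PySem.List.pyGetD dig_list 1 0
      let temp_list := PySem.List.pySetD (PySem.List.slice dig_list (some 1) none) 0 temp
      1 + calc_py temp_list
termination_by dig_list.length
decreasing_by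
  · simp [PySem.List.length_slice]; omega
  · rename_i h _ _
    rw [PySem.List.slice_to_neg_ofNat dig_list 2 (by omega)]
    simp; omega
  · rename_i h _ _
    simp [PySem.List.length_pySetD, PySem.List.slice_from_one]
    omega

-- ===== PORT B =====
-- the while-loop of Source B: i, j two pointers into the unchanged list, left/right the
-- running merged end values, count the number of merges
def calcLoop (l : List Int) (i j : Nat) (left right count : Int) : Int :=
  if i < j then
    if left = right then
      (if i + 1 < j - 1 then
        calcLoop l (i+1) (j-1) (l.getD (i+1) 0) (l.getD (j-1) 0) count
      else count)
    else if left > right then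
      calcLoop l i (j-1) left (right + l.getD (j-1) 0) (count+1)
    else
      calcLoop l (i+1) j (left + l.getD (i+1) 0) right (count+1)
  else count
termination_by j - i
decreasing_by all_goals omega

def calc_py_alt (dig_list : List Int) : Int :=
  if dig_list.length = 0 then 0
  else
    calcLoop dig_list 0 (dig_list.length - 1) (dig_list.getD 0 0)
      (dig_list.getD (dig_list.length - 1) 0) 0

-- ===== PRECONDITION & SPEC =====
def Spec_calc_py (dig_list : List Int) (out : Int) : Prop := out = calc_py_alt dig_list
instance (dig_list : List Int) (out : Int) : Decidable (Spec_calc_py dig_list out) := by unfold Spec_calc_py; infer_instance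

-- ===== CLAIM (what is proved, stated in full; the proofs are below) =====
def Claim_equal_calc_py : Prop := ∀ (dig_list : List Int), Dom_calc_py dig_list → Spec_calc_py dig_list (calc_py dig_list)

-- ===== LEMMAS AND PROOFS =====
lemma calc_py_short (l : List Int) (h : l.length ≤ 1) : calc_py l = 0 := by
  rw [calc_py]
  simp only [if_pos (by omega : l.length = 1 ∨ l.length = 0)]

lemma pyGetD_first (left right : Int) (mid : List Int) :
    PySem.List.pyGetD (left :: mid ++ [right]) 0 0 = left := PySem.List.pyGetD_zero_cons ..

lemma pyGetD_last (left right : Int) (mid : List Int) :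
    PySem.List.pyGetD (left :: mid ++ [right]) (-1) 0 = right := by
  have : left :: mid ++ [right] = (left :: mid) ++ [right] := by simp
  rw [this, PySem.List.pyGetD_neg_one_append_singleton]

lemma slice_mid (left right : Int) (mid : List Int) :
    PySem.List.slice (left :: mid ++ [right]) (some 1) (some (-1)) = mid := by
  simp only [PySem.List.slice, Int.reduceNeg, Order.lt_one_iff, PySem.List.clampIdx_neg_ofNat,
    zero_le_one, PySem.List.clampIdx_of_nonneg, Int.toNat_one]
  simp [List.take_left']

lemma pyGetD_penult (left right : Int) (mid : List Int) :
    PySem.List.pyGetD (left :: mid ++ [right]) (-2) 0 = (left :: mid).getLast (by simp) := by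
  rw [PySem.List.pyGetD_neg_ofNat _ 2 0 (by omega) (by simp)]
  have h1 : (left :: mid ++ [right]).length - 2 = mid.length := by simp
  have h2 : left :: mid ++ [right] = (left :: mid) ++ [right] := rfl
  rw [List.getLast_eq_getElem]
  simp only [h1, List.getElem_append, List.length_cons]
  rw [dif_pos (by omega)]
  simp

lemma slice_to_neg2 (left right : Int) (mid : List Int) :
    PySem.List.slice (left :: mid ++ [right]) none (some (-2)) = (left :: mid).dropLast := by
  rw [PySem.List.slice_to_neg_ofNat _ 2 (by omega)]
  have h1 : (left :: mid ++ [right]).length - 2 = mid.length := by simp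
  have h2 : left :: mid ++ [right] = (left :: mid) ++ [right] := rfl
  rw [h1, h2, List.take_append_of_le_length (by simp), List.dropLast_eq_take]
  simp

lemma pyGetD_one (left right : Int) (mid : List Int) :
    PySem.List.pyGetD (left :: mid ++ [right]) 1 0 = (mid ++ [right]).head (by simp) := by
  rw [PySem.List.pyGetD_eq_getElem _ 0 (by omega) (by simp)]
  simp [List.head_eq_getElem]

lemma calc_py_cons_append (left right : Int) (mid : List Int) :
    calc_py (left :: mid ++ [right]) =
      if left = right then calc_py mid
      else if left > right then
        (if h : mid = [] then 1
         else 1 + calc_py (left :: mid.dropLast ++ [right + mid.getLast h]))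
      else
        (if h : mid = [] then 1
         else 1 + calc_py ((left + mid.head h) :: mid.tail ++ [right])) := by
  rw [calc_py]
  rw [if_neg (by simp)]
  rw [pyGetD_first, pyGetD_last, slice_mid]
  by_cases heq : left = right
  · simp [heq]
  · rw [if_neg heq, if_neg heq]
    by_cases hgt : left > right
    · rw [if_pos hgt, if_pos hgt]
      simp only [pyGetD_penult, slice_to_neg2]
      by_cases hnil : mid = []
      · subst hnil
        rw [dif_pos rfl]
        simp [calc_py_short]
      · rw [dif_neg hnil]
        rw [List.getLast_cons hnil]
        congr 1
        have hd : (left :: mid).dropLast = left :: mid.dropLast := by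
          cases mid with | nil => exact absurd rfl hnil | cons a l => simp
        rw [hd]
    · rw [if_neg hgt, if_neg hgt]
      simp only [pyGetD_one, PySem.List.slice_from_one]
      by_cases hnil : mid = []
      · subst hnil
        rw [dif_pos rfl]
        simp [PySem.List.pySetD_of_nonneg, calc_py_short]
      · rw [dif_neg hnil]
        cases mid with
        | nil => exact absurd rfl hnil
        | cons m ms =>
          congr 1
          simp [PySem.List.pySetD_of_nonneg]

lemma seg_decomp (l : List Int) (a k : Nat) (h : a + (k+2) ≤ l.length) :
    (l.drop a).take (k+2) = l.getD a 0 :: ((l.drop (a+1)).take k) ++ [l.getD (a+k+1) 0] := by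
  rw [List.drop_eq_getElem_cons (by omega), List.take_succ_cons]
  rw [List.getD_eq_getElem l 0 (by omega : a < l.length)]
  congr 1
  have hk : k < (List.drop (a+1) l).length := by simp; omega
  rw [← List.take_concat_get hk, List.concat_eq_append]
  congr 2
  rw [List.getElem_drop, List.getD_eq_getElem l 0 (by omega : a + k + 1 < l.length)]
  congr 1
  omega

lemma seg_last (l : List Int) (a m : Nat) (h1 : 1 ≤ m) (h : a + m ≤ l.length)
    (h' : (l.drop a).take m ≠ []) :
    ((l.drop a).take m).getLast h' = l.getD (a+m-1) 0 := by
  rw [List.getLast_eq_getElem]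
  have hlen : ((l.drop a).take m).length = m := by simp; omega
  rw [List.getD_eq_getElem l 0 (by omega : a + m - 1 < l.length)]
  simp only [List.getElem_take, List.getElem_drop, hlen]
  congr 1
  omega

lemma seg_dropLast (l : List Int) (a m : Nat) (h : a + m ≤ l.length) :
    ((l.drop a).take m).dropLast = (l.drop a).take (m-1) := by
  rw [List.dropLast_eq_take, List.take_take]
  congr 1
  simp
  omega

lemma seg_head (l : List Int) (a m : Nat) (ha : a < l.length)
    (h' : (l.drop a).take m ≠ []) :
    ((l.drop a).take m).head h' = l.getD a 0 := by
  rw [List.head_eq_getElem, List.getD_eq_getElem l 0 ha]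
  simp only [List.getElem_take, List.getElem_drop]
  congr 1

lemma seg_tail (l : List Int) (a m : Nat) :
    ((l.drop a).take m).tail = (l.drop (a+1)).take (m-1) := by
  apply List.ext_getElem
  · simp; omega
  · intro k h1 h2
    simp only [List.getElem_tail, List.getElem_take, List.getElem_drop]
    congr 1
    omega

lemma calcLoop_spec (n : Nat) : ∀ (l : List Int) (i j : Nat) (left right count : Int),
    j - i ≤ n → i < j → j < l.length →
    calcLoop l i j left right count
      = count + calc_py (left :: (l.drop (i+1)).take (j-(i+1)) ++ [right]) := by
  induction n with
  | zero => intro l i j left right count hn hij hj; omega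
  | succ n ih =>
    intro l i j left right count hn hij hj
    rw [calcLoop, if_pos hij, calc_py_cons_append]
    by_cases heq : left = right
    · rw [if_pos heq, if_pos heq]
      by_cases hlt : i + 1 < j - 1
      · rw [if_pos hlt]
        have hdec : (l.drop (i+1)).take (j-(i+1))
            = l.getD (i+1) 0 :: ((l.drop (i+2)).take ((j-1)-((i+1)+1))) ++ [l.getD (j-1) 0] := by
          have h2 : j - (i+1) = (j-i-3) + 2 := by omega
          rw [h2, seg_decomp l (i+1) (j-i-3) (by omega)]
          congr 3 <;> omega
        rw [hdec]
        exact ih l (i+1) (j-1) _ _ count (by omega) (by omega) (by omega)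
      · rw [if_neg hlt]
        have h0 : calc_py ((l.drop (i+1)).take (j-(i+1))) = 0 :=
          calc_py_short _ (by simp; omega)
        rw [h0]; ring
    · rw [if_neg heq, if_neg heq]
      by_cases hgt : left > right
      · rw [if_pos hgt, if_pos hgt]
        by_cases hj1 : j = i + 1
        · have hmid : (l.drop (i+1)).take (j-(i+1)) = [] := by simp [hj1]
          rw [dif_pos hmid]
          rw [calcLoop]
          rw [if_neg (by omega : ¬ i < j - 1)]
        · have hmid : (l.drop (i+1)).take (j-(i+1)) ≠ [] := by simp; omega
          rw [dif_neg hmid]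
          rw [seg_last l (i+1) (j-(i+1)) (by omega) (by omega) hmid]
          rw [seg_dropLast l (i+1) (j-(i+1)) (by omega)]
          have hidx : (i+1) + (j-(i+1)) - 1 = j - 1 := by omega
          have hidx2 : j - (i+1) - 1 = (j-1) - (i+1) := by omega
          rw [hidx, hidx2]
          rw [ih l i (j-1) left (right + l.getD (j-1) 0) (count+1) (by omega) (by omega) (by omega)]
          ring
      · rw [if_neg hgt, if_neg hgt]
        by_cases hj1 : j = i + 1
        · have hmid : (l.drop (i+1)).take (j-(i+1)) = [] := by simp [hj1]
          rw [dif_pos hmid]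
          rw [calcLoop]
          rw [if_neg (by omega : ¬ i + 1 < j)]
        · have hmid : (l.drop (i+1)).take (j-(i+1)) ≠ [] := by simp; omega
          rw [dif_neg hmid]
          rw [seg_head l (i+1) (j-(i+1)) (by omega) hmid]
          rw [seg_tail l (i+1) (j-(i+1))]
          have hidx : j - (i+1) - 1 = j - ((i+1)+1) := by omega
          rw [hidx]
          rw [ih l (i+1) j (left + l.getD (i+1) 0) right (count+1) (by omega) (by omega) (by omega)]
          ring

theorem calc_py_eq_alt (l : List Int) : calc_py l = calc_py_alt l := by
  unfold calc_py_alt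
  by_cases h0 : l.length = 0
  · rw [if_pos h0, calc_py_short l (by omega)]
  · rw [if_neg h0]
    by_cases h1 : l.length = 1
    · rw [calc_py_short l (by omega), calcLoop, if_neg (by omega)]
    · rw [calcLoop_spec l.length l 0 (l.length - 1) _ _ 0 (by omega) (by omega) (by omega)]
      have hdec : l = l.getD 0 0 :: ((l.drop 1).take ((l.length - 1)-(0+1))) ++ [l.getD (l.length - 1) 0] := by
        conv_lhs => rw [show l = (l.drop 0).take l.length by simp]
        rw [show l.length = (l.length - 2) + 2 by omega, seg_decomp l 0 (l.length - 2) (by omega)]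
        congr 3; simp
      conv_lhs => rw [hdec]
      ring

-- ===== VERDICT (by name: the statement is the Claim_ definition above) =====
theorem calc_py_spec : Claim_equal_calc_py := by
  intro l _
  unfold Spec_calc_py
  exact calc_py_eq_alt l
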